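-- pv_equiv track=rewrite | github.com/jcolinpatrick/kryptos | scripts/grille/blitz_grille_geometry_v4.py | autokey_beau_dec
-- ===== SOURCE A (Python) =====
-- AZ = "ABCDEFGHIJKLMNOPQRSTUVWXYZ"
--
-- def autokey_beau_dec(ct, seed, alpha=AZ):
--     n = len(alpha); key = list(seed); pt = []
--     for i, ch in enumerate(ct):
--         k = alpha.index(key[i])
--         c = alpha.index(ch)
--         p_char = alpha[(k - c) % n]
--         pt.append(p_char); key.append(p_char)
--     return ''.join(pt)
-- ===== SOURCE B (Python) =====
-- AZ = "ABCDEFGHIJKLMNOPQRSTUVWXYZ"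
--
-- def autokey_beau_dec(ct, seed, alpha=AZ):
--     # Autokey with seed length m splits into m independent interleaved streams:
--     # position i only ever depends on position i-m.  So decrypt each residue
--     # class r, r+m, r+2m, ... on its own, carrying one key character per stream,
--     # and write into a preallocated output -- no growing key buffer at all.
--     n = len(alpha); m = len(seed); L = len(ct)
--     out = [None] * L
--     for r in range(min(m, L)):
--         k = alpha.index(seed[r])
--         i = r
--         while i < L:
--             p = alpha[(k - alpha.index(ct[i])) % n]
--             out[i] = p
--             k = alpha.index(p)
--             i += m
--     return "".join(out)
-- ===== Notes on version B (the rewrite author's own statement) =====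
-- stated objective: alternative
-- what changed: Exploits that autokey with seed length m makes position i depend only on position i-m: B decrypts the m interleaved residue-class streams independently (outer loop over classes, inner stride-m walk carrying one key character), writing into a preallocated output, instead of A's single left-to-right pass over a growing key buffer.
import Mathlib
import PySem

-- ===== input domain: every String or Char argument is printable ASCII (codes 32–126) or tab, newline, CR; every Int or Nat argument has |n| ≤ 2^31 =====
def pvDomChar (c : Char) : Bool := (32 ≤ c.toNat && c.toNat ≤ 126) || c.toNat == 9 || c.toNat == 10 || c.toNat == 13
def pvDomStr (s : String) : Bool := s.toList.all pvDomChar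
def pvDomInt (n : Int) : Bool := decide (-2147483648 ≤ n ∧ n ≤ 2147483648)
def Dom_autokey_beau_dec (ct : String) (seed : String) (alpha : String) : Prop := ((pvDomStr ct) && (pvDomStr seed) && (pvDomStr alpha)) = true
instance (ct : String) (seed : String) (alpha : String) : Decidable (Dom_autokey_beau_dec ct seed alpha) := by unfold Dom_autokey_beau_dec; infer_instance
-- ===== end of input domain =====

-- B decrypts the m interleaved residue-class streams independently (position i only depends
-- on position i-m) instead of A's left-to-right pass over a growing key buffer (objective: alternative).

-- ===== PORT A =====
def autokey_beau_dec (ct : String) (seed : String) (alpha : String) : String :=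
  let alphaL := alpha.toList
  let n : Int := (alphaL.length : Int)
  let st := (PySem.List.enumerate ct.toList 0).foldl
    (fun (st : List Char × List Char) (p : Int × Char) =>
      let k : Int := ((PySem.List.index? alphaL (PySem.List.pyGetD st.1 p.1 ' ')).getD 0 : Nat)
      let c : Int := ((PySem.List.index? alphaL p.2).getD 0 : Nat)
      let pchar := PySem.List.pyGetD alphaL (PySem.Int.mod (k - c) n) ' '
      (st.1 ++ [pchar], st.2 ++ [pchar]))
    (seed.toList, ([] : List Char))
  String.ofList st.2

-- ===== PORT B =====
-- inner `while i < L` walk of one residue-class stream; fuel = ct length bounds the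
-- iteration count (each step advances i by m ≥ 1 on every call the outer loop makes)
def innerB (aL cL : List Char) (m : Nat) : Nat → Nat → Int → List (Option Char) → List (Option Char)
  | 0, _, _, out => out
  | fuel + 1, i, k, out =>
    if i < cL.length then
      let c : Int := ((PySem.List.index? aL (cL.getD i ' ')).getD 0 : Nat)
      let pch := PySem.List.pyGetD aL (PySem.Int.mod (k - c) (aL.length : Int)) ' '
      innerB aL cL m fuel (i + m) (((PySem.List.index? aL pch).getD 0 : Nat)) (out.set i (some pch))
    else out

def autokey_beau_dec_alt (ct : String) (seed : String) (alpha : String) : String :=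
  let aL := alpha.toList
  let cL := ct.toList
  let sL := seed.toList
  let m := sL.length
  let L := cL.length
  let out := (List.range (min m L)).foldl
    (fun out r => innerB aL cL m L r (((PySem.List.index? aL (sL.getD r ' ')).getD 0 : Nat)) out)
    (List.replicate L (none : Option Char))
  String.ofList (out.map (fun o => o.getD ' '))

-- ===== PRECONDITION & SPEC =====
-- Pre_ excludes exactly the inputs on which A raises: a nonempty ct with an empty seed
-- (IndexError), or with a used ct/seed character outside alpha (ValueError).
def Pre_autokey_beau_dec (ct : String) (seed : String) (alpha : String) : Prop :=
  ct.toList = [] ∨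
    (seed.toList ≠ [] ∧
      (ct.toList.all (fun c => decide (c ∈ alpha.toList))) = true ∧
      ((seed.toList.take ct.toList.length).all (fun c => decide (c ∈ alpha.toList))) = true)
instance (ct : String) (seed : String) (alpha : String) : Decidable (Pre_autokey_beau_dec ct seed alpha) := by unfold Pre_autokey_beau_dec; infer_instance
def pvWitness_autokey_beau_dec : String × String × String := ("BA", "A", "AB")

def Spec_autokey_beau_dec (ct : String) (seed : String) (alpha : String) (out : String) : Prop := out = autokey_beau_dec_alt ct seed alpha
instance (ct : String) (seed : String) (alpha : String) (out : String) : Decidable (Spec_autokey_beau_dec ct seed alpha out) := by unfold Spec_autokey_beau_dec; infer_instance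

-- ===== CLAIM (what is proved, stated in full; the proofs are below) =====
def Claim_equal_autokey_beau_dec : Prop := ∀ (ct : String) (seed : String) (alpha : String), Dom_autokey_beau_dec ct seed alpha → Pre_autokey_beau_dec ct seed alpha → Spec_autokey_beau_dec ct seed alpha (autokey_beau_dec ct seed alpha)

-- ===== LEMMAS AND PROOFS =====

-- A's loop body, named for the proofs (definitionally the port's lambda)
def stepA (aL : List Char) (st : List Char × List Char) (p : Int × Char) : List Char × List Char :=
  let k : Int := ((PySem.List.index? aL (PySem.List.pyGetD st.1 p.1 ' ')).getD 0 : Nat)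
  let c : Int := ((PySem.List.index? aL p.2).getD 0 : Nat)
  let pchar := PySem.List.pyGetD aL (PySem.Int.mod (k - c) (aL.length : Int)) ' '
  (st.1 ++ [pchar], st.2 ++ [pchar])

theorem portA_eq (ct seed alpha : String) :
    autokey_beau_dec ct seed alpha =
      String.ofList ((PySem.List.enumerate ct.toList 0).foldl (stepA alpha.toList) (seed.toList, [])).2 := rfl

-- index of a character in alpha, as both ports compute it
def kIdx (aL : List Char) (c : Char) : Int := ((PySem.List.index? aL c).getD 0 : Nat)
def sIdx (aL sL : List Char) (r : Nat) : Int := kIdx aL (sL.getD r ' ')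
def cIdx (aL cL : List Char) (j : Nat) : Int := kIdx aL (cL.getD j ' ')
def fChar (aL : List Char) (v : Int) : Char := aL.getD v.toNat ' '

-- the list of plaintext indices after t steps (the common recurrence of both programs)
def eList (aL sL cL : List Char) : Nat → List Int
  | 0 => []
  | t+1 =>
    let prev := eList aL sL cL t
    prev ++ [((if t < sL.length then sIdx aL sL t
               else kIdx aL (fChar aL (prev.getD (t - sL.length) 0))) - cIdx aL cL t) % (aL.length : Int)]

def eVal (aL sL cL : List Char) (t : Nat) : Int := (eList aL sL cL (t + 1)).getD t 0
-- the key index consumed at position j (for j < |seed| from the seed, else canonicalised plaintext)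
def gVal (aL sL cL : List Char) (j : Nat) : Int :=
  if j < sL.length then sIdx aL sL j else kIdx aL (fChar aL (eVal aL sL cL (j - sL.length)))
def ptsL (aL sL cL : List Char) (t : Nat) : List Char := (eList aL sL cL t).map (fChar aL)

theorem alen_pos (aL : List Char) (ha : aL ≠ []) : (0:Int) < (aL.length : Int) := by
  exact_mod_cast List.length_pos_iff.mpr ha

theorem eList_length (aL sL cL : List Char) (t : Nat) : (eList aL sL cL t).length = t := by
  induction t with
  | zero => rfl
  | succ t ih => rw [eList]; simpa using ih

theorem eList_getD (aL sL cL : List Char) (j t : Nat) (h : j < t) :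
    (eList aL sL cL t).getD j 0 = eVal aL sL cL j := by
  induction t with
  | zero => omega
  | succ t ih =>
    rcases Nat.lt_or_ge j t with hlt | hge
    · rw [← ih hlt, eList, List.getD_append _ _ _ _ (by rw [eList_length]; omega)]
    · have : j = t := by omega
      subst this
      rfl

theorem eVal_eq (aL sL cL : List Char) (hm0 : 0 < sL.length) (t : Nat) :
    eVal aL sL cL t = (gVal aL sL cL t - cIdx aL cL t) % (aL.length : Int) := by
  rw [eVal, eList, List.getD_append_right _ _ _ _ (by rw [eList_length]), eList_length,
    Nat.sub_self, gVal]
  rcases Nat.lt_or_ge t sL.length with hlt | hge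
  · rw [if_pos hlt, if_pos hlt]
    rfl
  · rw [if_neg (by omega), if_neg (by omega), eList_getD aL sL cL _ t (by omega)]
    rfl

theorem eVal_nonneg (aL sL cL : List Char) (hm0 : 0 < sL.length) (ha : aL ≠ []) (t : Nat) : 0 ≤ eVal aL sL cL t := by
  rw [eVal_eq aL sL cL hm0]
  exact Int.emod_nonneg _ (by have := alen_pos aL ha; omega)

theorem eVal_lt (aL sL cL : List Char) (hm0 : 0 < sL.length) (ha : aL ≠ []) (t : Nat) :
    eVal aL sL cL t < (aL.length : Int) := by
  rw [eVal_eq aL sL cL hm0]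
  exact Int.emod_lt_of_pos _ (alen_pos aL ha)

theorem ptsL_succ (aL sL cL : List Char) (t : Nat) :
    ptsL aL sL cL (t + 1) = ptsL aL sL cL t ++ [fChar aL (eVal aL sL cL t)] := by
  unfold ptsL
  rw [show eList aL sL cL (t+1) = eList aL sL cL t ++ [eVal aL sL cL t] by
        rw [eVal, eList]
        congr 1
        rw [List.getD_append_right _ _ _ _ (by rw [eList_length]), eList_length, Nat.sub_self]
        rfl,
    List.map_append]
  rfl

theorem ptsL_getD (aL sL cL : List Char) (j t : Nat) (h : j < t) :
    (ptsL aL sL cL t).getD j ' ' = fChar aL (eVal aL sL cL j) := by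
  rw [ptsL, List.getD_eq_getElem _ _ (by rw [List.length_map, eList_length]; omega),
    List.getElem_map, ← eList_getD aL sL cL j t h,
    List.getD_eq_getElem _ _ (by rw [eList_length]; omega)]

theorem ptsL_length (aL sL cL : List Char) (t : Nat) : (ptsL aL sL cL t).length = t := by
  rw [ptsL, List.length_map, eList_length]

theorem ptsL_eq_map (aL sL cL : List Char) (t : Nat) :
    ptsL aL sL cL t = (List.range t).map (fun j => fChar aL (eVal aL sL cL j)) := by
  apply List.ext_getElem
  · rw [ptsL_length, List.length_map, List.length_range]
  · intro j h1 h2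
    rw [List.getElem_map, List.getElem_range]
    rw [← List.getD_eq_getElem _ ' ' h1, ptsL_getD aL sL cL j t (by rwa [ptsL_length] at h1)]

theorem pyGetD_alpha (aL : List Char) (ha : aL ≠ []) (sL cL : List Char) (hm0 : 0 < sL.length) (t : Nat) :
    PySem.List.pyGetD aL (eVal aL sL cL t) ' ' = fChar aL (eVal aL sL cL t) := by
  rw [PySem.List.pyGetD_eq_getElem aL ' ' (eVal_nonneg aL sL cL hm0 ha t) (eVal_lt aL sL cL hm0 ha t),
    fChar, List.getD_eq_getElem]

-- one step of A's loop
theorem stepA_step (aL sL cL : List Char) (hm0 : 0 < sL.length) (ha : aL ≠ [])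
    (t : Nat) (ht : t < cL.length) :
    stepA aL (sL ++ ptsL aL sL cL t, ptsL aL sL cL t) ((t : Int), cL[t]) =
      (sL ++ ptsL aL sL cL (t + 1), ptsL aL sL cL (t + 1)) := by
  unfold stepA
  simp only [PySem.List.pyGetD_natCast]
  have hc : ((PySem.List.index? aL cL[t]).getD 0 : Int) = cIdx aL cL t := by
    rw [cIdx, kIdx, List.getD_eq_getElem _ _ ht]
  have hk : (((PySem.List.index? aL ((sL ++ ptsL aL sL cL t).getD t ' ')).getD 0 : Nat) : Int)
      = gVal aL sL cL t := by
    rcases Nat.lt_or_ge t sL.length with hlt | hge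
    · rw [List.getD_append _ _ _ _ hlt, gVal, if_pos hlt]
      rfl
    · rw [List.getD_append_right _ _ _ _ hge, ptsL_getD aL sL cL _ t (by omega), gVal,
        if_neg (by omega)]
      rfl
  rw [hk, hc, PySem.Int.mod_eq_emod_of_pos (alen_pos aL ha), ← eVal_eq aL sL cL hm0,
    pyGetD_alpha aL ha sL cL hm0 t, ptsL_succ, List.append_assoc]

-- A's whole loop
theorem invariantA (aL sL cL : List Char) (hm : sL ≠ []) (ha : aL ≠ []) :
    ∀ t, t ≤ cL.length →
      (PySem.List.enumerate (cL.take t) 0).foldl (stepA aL) (sL, []) =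
        (sL ++ ptsL aL sL cL t, ptsL aL sL cL t) := by
  intro t
  induction t with
  | zero =>
    intro _
    simp [ptsL, eList]
  | succ t ih =>
    intro ht1
    have ht : t < cL.length := by omega
    have htake : cL.take (t + 1) = cL.take t ++ [cL[t]] := by
      rw [List.take_add_one, List.getElem?_eq_getElem ht]
      rfl
    have hlen : (cL.take t).length = t := by simp [List.length_take]; omega
    have henum : PySem.List.enumerate (cL.take (t+1)) 0
        = PySem.List.enumerate (cL.take t) 0 ++ [((t : Int), cL[t])] := by
      rw [htake, PySem.List.enumerate_append, hlen, PySem.List.enumerate_cons,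
        PySem.List.enumerate_nil]
      norm_num
    rw [henum, List.foldl_append, ih (by omega), List.foldl_cons, List.foldl_nil,
      stepA_step aL sL cL (List.length_pos_iff.mpr hm) ha t ht]

-- positions visited by the stride-m walk starting at i
def Covered (i m j : Nat) : Prop := ∃ q, j = i + q * m

theorem covered_mod (m r j : Nat) (_hm0 : 0 < m) (hr : r < m) :
    Covered r m j ↔ j % m = r := by
  constructor
  · rintro ⟨q, rfl⟩
    rw [Nat.add_mul_mod_self_right, Nat.mod_eq_of_lt hr]
  · intro h
    refine ⟨j / m, ?_⟩
    have hd := Nat.div_add_mod j m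
    rw [Nat.mul_comm (j / m) m]
    omega

theorem covered_shift (i m j : Nat) (_hm0 : 0 < m) :
    Covered i m j ↔ (j = i ∨ Covered (i + m) m j) := by
  constructor
  · rintro ⟨q, rfl⟩
    cases q with
    | zero => left; omega
    | succ q => right; exact ⟨q, by ring⟩
  · rintro (rfl | ⟨q, rfl⟩)
    · exact ⟨0, by omega⟩
    · exact ⟨q + 1, by ring⟩

-- the inner stride walk fills exactly its residue class with the plaintext characters
theorem innerB_spec (aL sL cL : List Char) (hm0 : 0 < sL.length) (ha : aL ≠ []) :
    ∀ (fuel i : Nat), cL.length ≤ i + fuel → ∀ (out : List (Option Char)), out.length = cL.length →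
      (innerB aL cL sL.length fuel i (gVal aL sL cL i) out).length = cL.length ∧
      ∀ j, j < cL.length →
        (Covered i sL.length j →
          (innerB aL cL sL.length fuel i (gVal aL sL cL i) out).getD j none =
            some (fChar aL (eVal aL sL cL j))) ∧
        (¬ Covered i sL.length j →
          (innerB aL cL sL.length fuel i (gVal aL sL cL i) out).getD j none = out.getD j none) := by
  intro fuel
  induction fuel with
  | zero =>
    intro i hfi out hlen
    refine ⟨hlen, fun j hj => ⟨fun hc => ?_, fun _ => by rw [innerB]⟩⟩
    obtain ⟨q, rfl⟩ := hc
    omega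
  | succ fuel ih =>
    intro i hfi out hlen
    by_cases hi : i < cL.length
    · have hstep : innerB aL cL sL.length (fuel+1) i (gVal aL sL cL i) out
          = innerB aL cL sL.length fuel (i + sL.length) (gVal aL sL cL (i + sL.length))
              (out.set i (some (fChar aL (eVal aL sL cL i)))) := by
        rw [innerB, if_pos hi]
        have hpch : PySem.List.pyGetD aL
            (PySem.Int.mod (gVal aL sL cL i - ((PySem.List.index? aL (cL.getD i ' ')).getD 0 : Nat))
              (aL.length : Int)) ' ' = fChar aL (eVal aL sL cL i) := by
          rw [show (((PySem.List.index? aL (cL.getD i ' ')).getD 0 : Nat) : Int) = cIdx aL cL i from rfl,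
            PySem.Int.mod_eq_emod_of_pos (alen_pos aL ha), ← eVal_eq aL sL cL hm0,
            pyGetD_alpha aL ha sL cL hm0 i]
        simp only [hpch]
        have hk2 : (((PySem.List.index? aL (fChar aL (eVal aL sL cL i))).getD 0 : Nat) : Int)
            = gVal aL sL cL (i + sL.length) := by
          rw [gVal, if_neg (by omega), Nat.add_sub_cancel]
          rfl
        rw [hk2]
      rw [hstep]
      obtain ⟨hlen', hres⟩ := ih (i + sL.length) (by omega)
        (out.set i (some (fChar aL (eVal aL sL cL i)))) (by rw [List.length_set, hlen])
      refine ⟨hlen', fun j hj => ⟨fun hc => ?_, fun hc => ?_⟩⟩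
      · rcases (covered_shift i sL.length j hm0).mp hc with rfl | hc'
        · rw [(hres j hj).2 (by rintro ⟨q, hq⟩; omega),
            List.getD_eq_getElem _ _ (by rw [List.length_set, hlen]; exact hj),
            List.getElem_set, if_pos rfl]
        · exact (hres j hj).1 hc'
      · have hc' : ¬ Covered (i + sL.length) sL.length j :=
          fun h => hc ((covered_shift i sL.length j hm0).mpr (Or.inr h))
        have hij : j ≠ i := fun he => hc (he ▸ ⟨0, by omega⟩)
        rw [(hres j hj).2 hc',
          List.getD_eq_getElem _ _ (by rw [List.length_set, hlen]; exact hj),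
          List.getElem_set, if_neg (fun he => hij he.symm), List.getD_eq_getElem _ _ (by omega)]
    · have hid : innerB aL cL sL.length (fuel+1) i (gVal aL sL cL i) out = out := by
        rw [innerB, if_neg hi]
      refine ⟨by rw [hid, hlen], fun j hj => ⟨fun hc => ?_, fun _ => by rw [hid]⟩⟩
      obtain ⟨q, rfl⟩ := hc
      omega

-- the outer loop over residue classes
theorem outer_spec (aL sL cL : List Char) (hm0 : 0 < sL.length) (ha : aL ≠ []) :
    ∀ r, r ≤ min sL.length cL.length →
      ((List.range r).foldl
          (fun out r => innerB aL cL sL.length cL.length r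
            (((PySem.List.index? aL (sL.getD r ' ')).getD 0 : Nat)) out)
          (List.replicate cL.length (none : Option Char))).length = cL.length ∧
      ∀ j, j < cL.length →
        ((List.range r).foldl
            (fun out r => innerB aL cL sL.length cL.length r
              (((PySem.List.index? aL (sL.getD r ' ')).getD 0 : Nat)) out)
            (List.replicate cL.length (none : Option Char))).getD j none =
          if j % sL.length < r then some (fChar aL (eVal aL sL cL j)) else none := by
  intro r
  induction r with
  | zero =>
    intro _
    refine ⟨by simp, fun j hj => ?_⟩
    rw [if_neg (by omega), List.getD_eq_getElem _ _ (by simpa using hj)]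
    simp
  | succ r ih =>
    intro hr
    obtain ⟨hlen, hprev⟩ := ih (by omega)
    have hkey : (((PySem.List.index? aL (sL.getD r ' ')).getD 0 : Nat) : Int) = gVal aL sL cL r := by
      rw [gVal, if_pos (by omega)]
      rfl
    rw [List.range_succ, List.foldl_append]
    simp only [List.foldl_cons, List.foldl_nil]
    rw [hkey]
    obtain ⟨hlen', hres⟩ := innerB_spec aL sL cL hm0 ha cL.length r (by omega) _ hlen
    refine ⟨hlen', fun j hj => ?_⟩
    have hcv : Covered r sL.length j ↔ j % sL.length = r :=
      covered_mod sL.length r j hm0 (by omega)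
    by_cases hc : j % sL.length = r
    · rw [(hres j hj).1 (hcv.mpr hc), if_pos (by omega)]
    · rw [(hres j hj).2 (fun h => hc (hcv.mp h)), hprev j hj]
      by_cases hlt : j % sL.length < r
      · rw [if_pos hlt, if_pos (by omega)]
      · rw [if_neg hlt, if_neg (by omega)]

theorem portB_final (ct seed alpha : String) (hm : seed.toList ≠ []) (ha : alpha.toList ≠ []) :
    autokey_beau_dec_alt ct seed alpha =
      String.ofList (ptsL alpha.toList seed.toList ct.toList ct.toList.length) := by
  set aL := alpha.toList
  set sL := seed.toList
  set cL := ct.toList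
  have hm0 : 0 < sL.length := List.length_pos_iff.mpr hm
  obtain ⟨hlen, hres⟩ := outer_spec aL sL cL hm0 ha (min sL.length cL.length) le_rfl
  show String.ofList (List.map _ _) = _
  have hout : ((List.range (min sL.length cL.length)).foldl
      (fun out r => innerB aL cL sL.length cL.length r
        (((PySem.List.index? aL (sL.getD r ' ')).getD 0 : Nat)) out)
      (List.replicate cL.length (none : Option Char)))
      = (List.range cL.length).map (fun j => some (fChar aL (eVal aL sL cL j))) := by
    apply List.ext_getElem
    · rw [hlen, List.length_map, List.length_range]
    · intro j h1 h2
      have hj : j < cL.length := by rwa [hlen] at h1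
      have := hres j hj
      rw [List.getD_eq_getElem _ _ h1] at this
      rw [this, if_pos (by have h3 := Nat.mod_lt j hm0; have h4 := Nat.mod_le j sL.length; omega),
        List.getElem_map, List.getElem_range]
  rw [hout, ptsL_eq_map, List.map_map]
  rfl

-- ===== VERDICT (by name: the statement is the Claim_ definition above) =====
theorem autokey_beau_dec_spec : Claim_equal_autokey_beau_dec := by
  intro ct seed alpha _ hpre
  unfold Spec_autokey_beau_dec
  by_cases h0 : ct.toList = []
  · rw [portA_eq, h0]
    show _ = autokey_beau_dec_alt ct seed alpha
    unfold autokey_beau_dec_alt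
    rw [h0]
    simp [PySem.List.enumerate_nil]
  · obtain ⟨hm, hct, _⟩ := hpre.resolve_left h0
    have ha : alpha.toList ≠ [] := by
      obtain ⟨c0, hc0⟩ := List.exists_mem_of_ne_nil _ h0
      intro hnil
      have := of_decide_eq_true (List.all_eq_true.mp hct c0 hc0)
      rw [hnil] at this
      exact List.not_mem_nil this
    have h := invariantA alpha.toList seed.toList ct.toList hm ha ct.toList.length le_rfl
    rw [List.take_length] at h
    rw [portA_eq, h, portB_final ct seed alpha hm ha]
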